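-- pv_equiv track=rewrite | github.com/tttapa/batmat | cr-update.py | cyclic_indices
-- ===== SOURCE A (Python) =====
-- def cyclic_indices(lgn, lgv=0):
--     if lgn != lgv:
--         for i in range(1 << (lgn - 1)):
--             yield 2 * i + 1
--         for l in range(1, lgn - lgv):
--             offset = 1 << l
--             stride = 2 * offset
--             for i in range(offset, 1 << lgn, stride):
--                 yield i
--     for i in range(0, 1 << lgn, 1 << (lgn - lgv)):
--         yield i
-- ===== SOURCE B (Python) =====
-- def cyclic_indices(lgn, lgv=0):
--     # Bucket every index of range(2**lgn) by its (capped) 2-adic valuation in one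
--     # ascending scan, then emit the buckets in valuation order.
--     cap = lgn - lgv
--     buckets = [[] for _ in range(cap + 1)]
--     for i in range(1 << lgn):
--         t = 0
--         j = i
--         while j % 2 == 0 and t < cap:
--             j //= 2
--             t += 1
--         buckets[t].append(i)
--     for b in buckets:
--         yield from b
-- ===== Notes on version B (the rewrite author's own statement) =====
-- stated objective: alternative
-- what changed: A enumerates each 2-adic valuation class by separate strided range loops; B makes one ascending scan over range(2**lgn), bucketing every index by its capped trailing-zero count, and then emits the buckets in valuation order.
import Mathlib
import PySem

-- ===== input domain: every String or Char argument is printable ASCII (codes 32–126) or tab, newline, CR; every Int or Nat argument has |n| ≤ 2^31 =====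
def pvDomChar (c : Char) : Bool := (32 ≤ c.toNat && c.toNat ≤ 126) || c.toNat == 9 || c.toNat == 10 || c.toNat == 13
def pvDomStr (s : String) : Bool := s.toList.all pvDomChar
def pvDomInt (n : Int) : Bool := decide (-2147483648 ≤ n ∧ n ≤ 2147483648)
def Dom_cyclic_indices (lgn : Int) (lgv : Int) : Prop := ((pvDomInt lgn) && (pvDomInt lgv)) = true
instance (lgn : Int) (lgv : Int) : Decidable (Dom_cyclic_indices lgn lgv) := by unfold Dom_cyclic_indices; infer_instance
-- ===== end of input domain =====

-- B replaces A's strided per-valuation-class range loops by one ascending scan that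
-- buckets every index of range(2**lgn) by its capped 2-adic valuation (alternative
-- decomposition, same cost). Both Pythons are generators; equivalence is about the
-- yielded sequence, materialised as a list.

-- ===== PORT A =====
-- Python A's 'yield's accumulate into the returned list, loop for loop.
def cyclic_indices (lgn : Int) (lgv : Int) : List Int :=
  (if lgn ≠ lgv then
     -- for i in range(1 << (lgn - 1)): yield 2 * i + 1
     ((PySem.List.pyRange 0 ((2:Int) ^ (lgn - 1).toNat) 1).map (fun i => 2 * i + 1))
     -- for l in range(1, lgn - lgv): for i in range(offset, 1 << lgn, stride): yield i
     ++ ((PySem.List.pyRange 1 (lgn - lgv) 1).flatMap (fun l =>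
           let offset : Int := (2:Int) ^ l.toNat
           let stride : Int := 2 * offset
           PySem.List.pyRange offset ((2:Int) ^ lgn.toNat) stride))
   else [])
  -- for i in range(0, 1 << lgn, 1 << (lgn - lgv)): yield i
  ++ PySem.List.pyRange 0 ((2:Int) ^ lgn.toNat) ((2:Int) ^ (lgn - lgv).toNat)

-- ===== PORT B =====
-- Python B's inner 'while j % 2 == 0 and t < cap' loop: capped trailing-zero count.
def altTz : Nat → Nat → Nat
  | 0, _ => 0
  | cap + 1, j => if j % 2 == 0 then altTz cap (j / 2) + 1 else 0

def cyclic_indices_alt (lgn : Int) (lgv : Int) : List Int :=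
  let cap := (lgn - lgv).toNat
  -- buckets = [[] for _ in range(cap + 1)]; for i in range(1 << lgn): buckets[t].append(i)
  let buckets :=
    (List.range (2 ^ lgn.toNat)).foldl
      (fun (bs : List (List Int)) i => bs.modify (altTz cap i) (fun b => b ++ [(i : Int)]))
      (List.replicate (cap + 1) [])
  -- for b in buckets: yield from b
  buckets.flatten

-- ===== PRECONDITION & SPEC =====
-- Pre_ excludes exactly the inputs on which Python A raises ValueError: a negative
-- shift amount in '1 << (lgn - 1)' (lgn = 0 with lgv ≠ lgn, or lgn < 0) or in
-- '1 << (lgn - lgv)' (lgv > lgn).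
def Pre_cyclic_indices (lgn : Int) (lgv : Int) : Prop :=
  (lgn = lgv ∧ 0 ≤ lgn) ∨ (lgv < lgn ∧ 1 ≤ lgn)
instance (lgn : Int) (lgv : Int) : Decidable (Pre_cyclic_indices lgn lgv) := by
  unfold Pre_cyclic_indices; infer_instance
def pvWitness_cyclic_indices : Int × Int := (3, 1)

def Spec_cyclic_indices (lgn : Int) (lgv : Int) (out : List Int) : Prop := out = cyclic_indices_alt lgn lgv
instance (lgn : Int) (lgv : Int) (out : List Int) : Decidable (Spec_cyclic_indices lgn lgv out) := by unfold Spec_cyclic_indices; infer_instance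

-- ===== CLAIM (what is proved, stated in full; the proofs are below) =====
def Claim_equal_cyclic_indices : Prop := ∀ (lgn : Int) (lgv : Int), Dom_cyclic_indices lgn lgv → Pre_cyclic_indices lgn lgv → Spec_cyclic_indices lgn lgv (cyclic_indices lgn lgv)

-- ===== LEMMAS AND PROOFS =====

-- two strictly increasing lists with the same members are equal
theorem pvEqOfSortedMem {l1 l2 : List Int} (h1 : l1.Pairwise (· < ·))
    (h2 : l2.Pairwise (· < ·)) (hm : ∀ x, x ∈ l1 ↔ x ∈ l2) : l1 = l2 := by
  refine List.Perm.eq_of_pairwise (fun a b _ _ hab hba => absurd hab (lt_asymm hba)) h1 h2 ?_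
  refine (List.perm_ext_iff_of_nodup ?_ ?_).mpr hm
  · exact h1.imp (fun h => ne_of_lt h)
  · exact h2.imp (fun h => ne_of_lt h)

theorem altTz_le (c : Nat) : ∀ i, altTz c i ≤ c := by
  induction c with
  | zero => intro i; simp [altTz]
  | succ c ih =>
    intro i
    simp only [altTz]
    split
    · exact Nat.succ_le_succ (ih _)
    · exact Nat.zero_le _

theorem altTz_even (c i : Nat) (h : i % 2 = 0) :
    altTz (c + 1) i = altTz c (i / 2) + 1 := by simp [altTz, h]

theorem altTz_odd (c i : Nat) (h : ¬ i % 2 = 0) :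
    altTz (c + 1) i = 0 := by simp [altTz, h]

theorem altTz_dvd (c : Nat) : ∀ i, 2 ^ (altTz c i) ∣ i := by
  induction c with
  | zero => intro i; simp [altTz]
  | succ c ih =>
    intro i
    by_cases h2 : i % 2 = 0
    · rw [altTz_even c i h2]
      obtain ⟨k, hk⟩ := ih (i / 2)
      refine ⟨k, ?_⟩
      have h4 : 2 ^ (altTz c (i / 2) + 1) * k = 2 * (2 ^ (altTz c (i / 2)) * k) := by
        rw [pow_succ]; ring
      omega
    · rw [altTz_odd c i h2]; simp

theorem altTz_not_dvd (c : Nat) : ∀ i, altTz c i < c → ¬ 2 ^ (altTz c i + 1) ∣ i := by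
  induction c with
  | zero => intro i h; omega
  | succ c ih =>
    intro i h
    by_cases h2 : i % 2 = 0
    · rw [altTz_even c i h2] at h ⊢
      have hlt : altTz c (i / 2) < c := by omega
      have hnd := ih (i / 2) hlt
      rintro ⟨k, hk⟩
      refine hnd ⟨k, ?_⟩
      have h4 : 2 ^ (altTz c (i / 2) + 1 + 1) * k = 2 * (2 ^ (altTz c (i / 2) + 1) * k) := by
        rw [pow_succ _ (altTz c (i / 2) + 1)]; ring
      omega
    · rw [altTz_odd c i h2]
      rintro ⟨k, hk⟩
      have h4 : 2 ^ (0 + 1) * k = 2 * k := by ring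
      omega

theorem altTz_of_dvd (c : Nat) : ∀ i, 2 ^ c ∣ i → altTz c i = c := by
  induction c with
  | zero => intro i _; rfl
  | succ c ih =>
    intro i hd
    obtain ⟨k, hk⟩ := hd
    have hk2 : i = 2 * (2 ^ c * k) := by rw [hk, pow_succ]; ring
    have h2 : i % 2 = 0 := by omega
    rw [altTz_even c i h2]
    have h3 : i / 2 = 2 ^ c * k := by omega
    rw [h3, ih _ ⟨k, rfl⟩]

theorem altTz_eq_self_iff (c i : Nat) : altTz c i = c ↔ 2 ^ c ∣ i := by
  constructor
  · intro h; have := altTz_dvd c i; rwa [h] at this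
  · exact altTz_of_dvd c i

theorem altTz_eq_iff_of_lt {c t : Nat} (ht : t < c) (i : Nat) :
    altTz c i = t ↔ (2 ^ t ∣ i ∧ ¬ 2 ^ (t + 1) ∣ i) := by
  constructor
  · rintro rfl
    exact ⟨altTz_dvd c i, altTz_not_dvd c i ht⟩
  · rintro ⟨h1, h2⟩
    rcases Nat.lt_or_ge (altTz c i) c with hu | hu
    · have hd := altTz_dvd c i
      have hnd := altTz_not_dvd c i hu
      rcases Nat.lt_trichotomy (altTz c i) t with h | h | h
      · exact absurd (dvd_trans (pow_dvd_pow 2 (by omega)) h1) hnd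
      · exact h
      · exact absurd (dvd_trans (pow_dvd_pow 2 (by omega)) hd) h2
    · have hc : altTz c i = c := le_antisymm (altTz_le c i) hu
      have hd := altTz_dvd c i
      rw [hc] at hd
      exact absurd (dvd_trans (pow_dvd_pow 2 (by omega)) hd) h2

-- indices of exact 2-adic valuation t, as an affine class
theorem pvValClass (t i : Nat) :
    (2 ^ t ∣ i ∧ ¬ 2 ^ (t + 1) ∣ i) ↔ ∃ j : Nat, i = 2 ^ t + 2 ^ (t + 1) * j := by
  constructor
  · rintro ⟨⟨m, hm⟩, hnd⟩
    have hm2 : m % 2 = 1 := by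
      rcases Nat.mod_two_eq_zero_or_one m with h | h
      · exfalso
        refine hnd ⟨m / 2, ?_⟩
        have hme : 2 * (m / 2) = m := by omega
        calc i = 2 ^ t * m := hm
          _ = 2 ^ t * (2 * (m / 2)) := (congrArg (fun z => 2 ^ t * z) hme).symm
          _ = 2 ^ (t + 1) * (m / 2) := by rw [pow_succ]; ring
      · exact h
    refine ⟨m / 2, ?_⟩
    have hm3 : m = 2 * (m / 2) + 1 := by omega
    calc i = 2 ^ t * m := hm
      _ = 2 ^ t * (2 * (m / 2) + 1) := congrArg (fun z => 2 ^ t * z) hm3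
      _ = 2 ^ t + 2 ^ (t + 1) * (m / 2) := by rw [pow_succ]; ring
  · rintro ⟨j, rfl⟩
    refine ⟨⟨1 + 2 * j, by rw [pow_succ]; ring⟩, ?_⟩
    rintro ⟨k, hk⟩
    have h1 : 2 ^ t * (1 + 2 * j) = 2 ^ t * (2 * k) := by
      calc 2 ^ t * (1 + 2 * j) = 2 ^ t + 2 ^ (t + 1) * j := by rw [pow_succ]; ring
        _ = 2 ^ (t + 1) * k := hk
        _ = 2 ^ t * (2 * k) := by rw [pow_succ]; ring
    have := Nat.eq_of_mul_eq_mul_left (by positivity) h1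
    omega

-- the bucket-filling foldl, bucket by bucket
theorem pvFoldlBuckets (c : Nat) (L : List Nat) :
    ∀ (bs : List (List Int)), bs.length = c + 1 →
      L.foldl (fun (bs : List (List Int)) i => bs.modify (altTz c i) (fun b => b ++ [(i : Int)])) bs
        = (List.range (c + 1)).map
            (fun t => bs.getD t [] ++ (L.filter (fun i => altTz c i = t)).map (fun (i : Nat) => (i : Int))) := by
  induction L with
  | nil =>
    intro bs hlen
    refine List.ext_getElem (by simp [hlen]) ?_
    intro t h1 h2
    simp only [List.foldl_nil] at h1 ⊢
    simp only [List.getElem_map, List.getElem_range, List.filter_nil, List.map_nil,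
      List.append_nil]
    exact (List.getD_eq_getElem bs [] (by omega)).symm
  | cons i L ih =>
    intro bs hlen
    simp only [List.foldl_cons]
    rw [ih _ (by simp [hlen])]
    refine List.ext_getElem (by simp) ?_
    intro t h1 h2
    have ht : t < c + 1 := by simpa using h1
    have hi : altTz c i < bs.length := by have := altTz_le c i; omega
    simp only [List.getElem_map, List.getElem_range]
    rw [List.getD_eq_getElem (bs.modify (altTz c i) (fun b => b ++ [(i : Int)])) []
        (by rw [List.length_modify]; omega),
      List.getD_eq_getElem bs [] (by omega)]
    rw [List.getElem_modify]
    by_cases he : altTz c i = t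
    · simp [he, List.append_assoc]
    · simp [he]

-- B in closed bucket form
theorem pvAltEq (lgn lgv : Int) :
    cyclic_indices_alt lgn lgv
      = ((List.range ((lgn - lgv).toNat + 1)).map
          (fun t => ((List.range (2 ^ lgn.toNat)).filter
              (fun i => altTz (lgn - lgv).toNat i = t)).map (fun (i : Nat) => (i : Int)))).flatten := by
  simp only [cyclic_indices_alt]
  rw [pvFoldlBuckets _ _ _ (by simp)]
  congr 1
  refine List.map_congr_left ?_
  intro t _
  simp

-- membership in a bucket
theorem pvMemBucket (n c t : Nat) (x : Int) :
    x ∈ ((List.range (2 ^ n)).filter (fun i => altTz c i = t)).map (fun (i : Nat) => (i : Int))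
      ↔ ∃ i : Nat, i < 2 ^ n ∧ altTz c i = t ∧ (i : Int) = x := by
  simp only [List.mem_map, List.mem_filter, List.mem_range, decide_eq_true_eq]
  constructor
  · rintro ⟨i, ⟨h1, h2⟩, h3⟩; exact ⟨i, h1, h2, h3⟩
  · rintro ⟨i, h1, h2, h3⟩; exact ⟨i, ⟨h1, h2⟩, h3⟩

-- buckets are strictly increasing
theorem pvBucketSorted (n c t : Nat) :
    (((List.range (2 ^ n)).filter (fun i => altTz c i = t)).map (fun (i : Nat) => (i : Int))).Pairwise (· < ·) := by
  refine List.pairwise_map.mpr ?_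
  refine List.Pairwise.imp ?_ (List.Pairwise.filter _ List.pairwise_lt_range)
  intro a b h
  exact_mod_cast h

-- positive-step pyRange is strictly increasing
theorem pvPyRangeSorted (a b s : Int) (hs : 0 < s) :
    (PySem.List.pyRange a b s).Pairwise (· < ·) := by
  rw [PySem.List.pyRange_of_pos a b hs]
  refine List.pairwise_map.mpr ?_
  refine List.Pairwise.imp ?_ List.pairwise_lt_range
  intro u v h
  have huv : (u : Int) < (v : Int) := by exact_mod_cast h
  nlinarith

-- the final chunk: indices divisible by 2^c
theorem pvFinalChunk (n c : Nat) :
    ((List.range (2 ^ n)).filter (fun i => altTz c i = c)).map (fun (i : Nat) => (i : Int))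
      = PySem.List.pyRange 0 ((2:Int) ^ n) ((2:Int) ^ c) := by
  refine pvEqOfSortedMem (pvBucketSorted n c c) (pvPyRangeSorted _ _ _ (by positivity)) ?_
  intro x
  rw [pvMemBucket, PySem.List.mem_pyRange_iff_of_pos (by positivity)]
  have hcast : ((2 ^ n : Nat) : Int) = (2:Int) ^ n := by push_cast; ring
  constructor
  · rintro ⟨i, h1, h2, rfl⟩
    obtain ⟨k, hk⟩ := (altTz_eq_self_iff c i).mp h2
    refine ⟨by positivity, ?_, ⟨(k : Int), ?_⟩⟩
    · exact_mod_cast h1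
    · push_cast [hk]; ring
  · rintro ⟨h0, h1, k, hk⟩
    have hp : (0:Int) < 2 ^ c := by positivity
    have hx : x = (2:Int) ^ c * k := by omega
    have hk0 : 0 ≤ k := by nlinarith
    refine ⟨x.toNat, by omega, ?_, by omega⟩
    refine (altTz_eq_self_iff c x.toNat).mpr ⟨k.toNat, ?_⟩
    have h5 : ((2 ^ c * k.toNat : Nat) : Int) = x := by
      push_cast
      rw [Int.toNat_of_nonneg hk0]
      linarith [hx]
    omega

-- middle chunks: indices with exact valuation t < c
theorem pvMidChunk (n c t : Nat) (ht : t < c) :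
    ((List.range (2 ^ n)).filter (fun i => altTz c i = t)).map (fun (i : Nat) => (i : Int))
      = PySem.List.pyRange ((2:Int) ^ t) ((2:Int) ^ n) (2 * (2:Int) ^ t) := by
  refine pvEqOfSortedMem (pvBucketSorted n c t) (pvPyRangeSorted _ _ _ (by positivity)) ?_
  intro x
  rw [pvMemBucket, PySem.List.mem_pyRange_iff_of_pos (by positivity)]
  have hcast : ((2 ^ n : Nat) : Int) = (2:Int) ^ n := by push_cast; ring
  constructor
  · rintro ⟨i, h1, h2, rfl⟩
    obtain ⟨j, rfl⟩ := (pvValClass t i).mp ((altTz_eq_iff_of_lt ht i).mp h2)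
    refine ⟨?_, ?_, ⟨(j : Int), ?_⟩⟩
    · have hj0 : (0:Int) ≤ 2 ^ (t + 1) * (j : Int) := by positivity
      push_cast [pow_succ] at hj0 ⊢
      linarith
    · exact_mod_cast h1
    · push_cast [pow_succ]; ring
  · rintro ⟨h0, h1, k, hk⟩
    have hp : (0:Int) < 2 ^ t := by positivity
    have hx : x = (2:Int) ^ t + 2 * (2:Int) ^ t * k := by omega
    have hk0 : 0 ≤ k := by nlinarith
    have h5 : ((2 ^ t + 2 ^ (t + 1) * k.toNat : Nat) : Int) = x := by
      push_cast [pow_succ]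
      rw [Int.toNat_of_nonneg hk0]
      linarith [hx]
    refine ⟨x.toNat, by omega, ?_, by omega⟩
    rw [altTz_eq_iff_of_lt ht, pvValClass]
    exact ⟨k.toNat, by omega⟩

-- the odd chunk matches A's 2*i+1 enumeration
theorem pvOddChunk (n c : Nat) (hn : 1 ≤ n) (hc : 1 ≤ c) :
    ((List.range (2 ^ n)).filter (fun i => altTz c i = 0)).map (fun (i : Nat) => (i : Int))
      = (PySem.List.pyRange 0 ((2:Int) ^ (n - 1)) 1).map (fun i => 2 * i + 1) := by
  have hn2 : 2 ^ n = 2 * 2 ^ (n - 1) := by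
    conv_lhs => rw [show n = (n - 1) + 1 by omega]
    rw [pow_succ]; ring
  refine pvEqOfSortedMem (pvBucketSorted n c 0) ?_ ?_
  · rw [PySem.List.pyRange_one]
    rw [List.map_map]
    refine List.pairwise_map.mpr ?_
    refine List.Pairwise.imp ?_ List.pairwise_lt_range
    intro u v h
    have huv : (u : Int) < (v : Int) := by exact_mod_cast h
    simp only [Function.comp]
    linarith
  · intro x
    rw [pvMemBucket]
    simp only [List.mem_map, PySem.List.mem_pyRange_one]
    constructor
    · rintro ⟨i, h1, h2, rfl⟩
      obtain ⟨j, rfl⟩ := (pvValClass 0 i).mp ((altTz_eq_iff_of_lt (by omega) i).mp h2)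
      refine ⟨(j : Int), ⟨by positivity, ?_⟩, ?_⟩
      · have hj : j < 2 ^ (n - 1) := by omega
        have : ((j : Int)) < ((2 ^ (n - 1) : Nat) : Int) := by exact_mod_cast hj
        calc (j : Int) < ((2 ^ (n - 1) : Nat) : Int) := this
          _ = (2:Int) ^ (n - 1) := by push_cast; ring
      · push_cast; ring
    · rintro ⟨y, ⟨hy0, hy1⟩, rfl⟩
      have hy2 : y < ((2 ^ (n - 1) : Nat) : Int) := by
        calc y < (2:Int) ^ (n - 1) := hy1
          _ = ((2 ^ (n - 1) : Nat) : Int) := by push_cast; ring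
      refine ⟨2 * y.toNat + 1, by omega, ?_, by omega⟩
      rw [altTz_eq_iff_of_lt (by omega), pvValClass]
      exact ⟨y.toNat, by omega⟩

-- ===== VERDICT (by name: the statement is the Claim_ definition above) =====
theorem cyclic_indices_spec : Claim_equal_cyclic_indices := by
  intro lgn lgv _ hpre
  unfold Spec_cyclic_indices
  rw [pvAltEq]
  rcases hpre with ⟨heq, hge⟩ | ⟨hlt, hge⟩
  · -- lgn = lgv: only the final unit-stride loop
    subst heq
    have hc0 : (lgn - lgn).toNat = 0 := by omega
    rw [hc0]
    simp only [Nat.zero_add, List.range_one, List.map_cons, List.map_nil,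
      List.flatten_cons, List.flatten_nil, List.append_nil]
    unfold cyclic_indices
    rw [if_neg (by omega), List.nil_append, hc0]
    exact (pvFinalChunk lgn.toNat 0).symm
  · -- lgv < lgn, 1 ≤ lgn
    set n := lgn.toNat with hn
    have hn1 : 1 ≤ n := by omega
    obtain ⟨d, hd⟩ : ∃ d : Nat, (lgn - lgv).toNat = d + 1 :=
      ⟨(lgn - lgv).toNat - 1, by omega⟩
    have hcI : ((d + 1 : Nat) : Int) = lgn - lgv := by omega
    unfold cyclic_indices
    rw [if_pos (by omega), hd]
    -- rewrite A's middle flatMap as a flatten of Nat-indexed chunks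
    have hmid : (PySem.List.pyRange 1 (lgn - lgv) 1).flatMap (fun l =>
           let offset : Int := (2:Int) ^ l.toNat
           let stride : Int := 2 * offset
           PySem.List.pyRange offset ((2:Int) ^ n) stride)
        = ((List.range d).map (fun k =>
            PySem.List.pyRange ((2:Int) ^ (k + 1)) ((2:Int) ^ n) (2 * (2:Int) ^ (k + 1)))).flatten := by
      rw [← hcI, PySem.List.pyRange_one]
      have hdn : (((d + 1 : Nat) : Int) - 1).toNat = d := by omega
      rw [hdn, List.flatMap_def, List.map_map]
      congr 1
      refine List.map_congr_left ?_
      intro k _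
      have hk1 : ((1 : Int) + (k : Int)).toNat = k + 1 := by omega
      simp only [Function.comp]
      rw [hk1]
    rw [hmid]
    -- split B's buckets: bucket 0, buckets 1..d, bucket d+1
    rw [List.range_succ, List.map_append, List.flatten_append, List.range_succ_eq_map,
      List.map_cons, List.flatten_cons, List.map_map]
    simp only [List.map_cons, List.map_nil, List.flatten_cons, List.flatten_nil,
      List.append_nil]
    -- replace each bucket by A's corresponding chunk
    have hlg1 : (lgn - 1).toNat = n - 1 := by omega
    rw [hlg1]
    have hb0 := pvOddChunk n (d + 1) hn1 (by omega)
    have hmap : (List.range d).map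
          ((fun t => ((List.range (2 ^ n)).filter
              (fun i => altTz (d + 1) i = t)).map (fun (i : Nat) => (i : Int))) ∘ Nat.succ)
        = (List.range d).map (fun k =>
            PySem.List.pyRange ((2:Int) ^ (k + 1)) ((2:Int) ^ n) (2 * (2:Int) ^ (k + 1))) := by
      refine List.map_congr_left ?_
      intro k hk
      have hkd : k < d := List.mem_range.mp hk
      simp only [Function.comp]
      exact pvMidChunk n (d + 1) (k + 1) (by omega)
    have hbfin := pvFinalChunk n (d + 1)
    rw [hb0, hmap, hbfin]
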